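-- pv_equiv track=rewrite | github.com/neurospin-projects/2024_petiton_biobd-bsnip-predict-dx | utils.py | get_gm_csf_index_map
-- ===== SOURCE A (Python) =====
-- def get_gm_csf_index_map(names):
--     """
--     From a list of ROI names ending in _GM_Vol and _CSF_Vol,
--     return a dict mapping {ROI_name: (GM_index, CSF_index)}.
--     """
--     pairs = {}
--     for i, name in enumerate(names):
--         base = name.rsplit("_", 2)[0]  # remove _GM_Vol or _CSF_Vol
--         if base not in pairs:
--             pairs[base] = [None, None]  # [GM_index, CSF_index]
--
--         if "_GM_Vol" in name:
--             pairs[base][0] = i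
--         elif "_CSF_Vol" in name:
--             pairs[base][1] = i
--
--     return {k: tuple(v) for k, v in pairs.items()}
-- ===== SOURCE B (Python) =====
-- def get_gm_csf_index_map(names):
--     """
--     From a list of ROI names ending in _GM_Vol and _CSF_Vol,
--     return a dict mapping {ROI_name: (GM_index, CSF_index)}.
--     """
--     bases = dict.fromkeys(n.rsplit("_", 2)[0] for n in names)
--     gm = {n.rsplit("_", 2)[0]: i for i, n in enumerate(names)
--           if "_GM_Vol" in n}
--     csf = {n.rsplit("_", 2)[0]: i for i, n in enumerate(names)
--            if "_CSF_Vol" in n and "_GM_Vol" not in n}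
--     return {b: (gm.get(b), csf.get(b)) for b in bases}
-- ===== Notes on version B (the rewrite author's own statement) =====
-- stated objective: alternative
-- what changed: Replaces the single interleaved insert-if-absent/mutate pass with a table-build-then-combine decomposition: ordered unique base names via dict.fromkeys, two separate filtered index dicts for GM and CSF, then one comprehension assembling (gm.get(b), csf.get(b)) per base.
import Mathlib
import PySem

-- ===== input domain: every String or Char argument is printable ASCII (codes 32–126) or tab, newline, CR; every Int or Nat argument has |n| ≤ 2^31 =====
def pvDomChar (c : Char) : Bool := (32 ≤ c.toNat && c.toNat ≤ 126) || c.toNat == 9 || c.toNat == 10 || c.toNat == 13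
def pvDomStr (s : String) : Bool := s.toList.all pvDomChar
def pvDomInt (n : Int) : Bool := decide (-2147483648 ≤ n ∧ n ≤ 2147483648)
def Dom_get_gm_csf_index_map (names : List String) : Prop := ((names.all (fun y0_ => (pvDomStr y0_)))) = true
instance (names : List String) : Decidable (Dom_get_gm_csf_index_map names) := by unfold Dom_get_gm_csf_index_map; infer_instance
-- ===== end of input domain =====

-- B re-implements A as a table-build-then-combine decomposition (ordered unique bases, two filtered
-- index dicts, then assemble); same cost, no speed claim. Equivalence of return values proved below.

-- ===== PORT A =====
-- shared helper: name.rsplit("_", 2)[0] for the single-char separator "_" — exact: drops at most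
-- the last two "_"-separated pieces, i.e. truncates before the 2nd-from-last "_" (1st if only one).
-- pvDropSeg (reversed chars): drop up to and including the first '_', none if no '_' remains.
def pvDropSeg : List Char → Option (List Char)
  | [] => none
  | c :: rest => if c = '_' then some rest else pvDropSeg rest

def pvRsplit2Base (s : String) : String :=
  match pvDropSeg s.toList.reverse with
  | none => s
  | some r1 =>
    match pvDropSeg r1 with
    | none => String.ofList r1.reverse
    | some r2 => String.ofList r2.reverse

-- one iteration of A's loop body (i, name) on the dict `pairs`
def pvStepA (d : PySem.Dict String (Option Int × Option Int)) (p : Int × String) :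
    PySem.Dict String (Option Int × Option Int) :=
  let base := pvRsplit2Base p.2
  let d' := if d.contains base then d else d.insert base (none, none)
  if PySem.Str.isIn "_GM_Vol" p.2 then d'.modify base (none, none) (fun v => (some p.1, v.2))
  else if PySem.Str.isIn "_CSF_Vol" p.2 then d'.modify base (none, none) (fun v => (v.1, some p.1))
  else d'

def get_gm_csf_index_map (names : List String) : List (String × Option Int × Option Int) :=
  let pairs := (PySem.List.enumerate names).foldl pvStepA PySem.Dict.empty
  -- {k: tuple(v) for k, v in pairs.items()} — tuple(v) is the pair itself
  pairs.items.map (fun kv => (kv.1, kv.2.1, kv.2.2))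

-- ===== PORT B =====
-- one iteration of the gm comprehension
def pvStepG (e : PySem.Dict String Int) (p : Int × String) : PySem.Dict String Int :=
  if PySem.Str.isIn "_GM_Vol" p.2 then e.insert (pvRsplit2Base p.2) p.1 else e

-- one iteration of the csf comprehension
def pvStepC (e : PySem.Dict String Int) (p : Int × String) : PySem.Dict String Int :=
  if PySem.Str.isIn "_CSF_Vol" p.2 && !(PySem.Str.isIn "_GM_Vol" p.2) then
    e.insert (pvRsplit2Base p.2) p.1
  else e

def get_gm_csf_index_map_alt (names : List String) : List (String × Option Int × Option Int) :=
  let bases := PySem.List.dedup (names.map pvRsplit2Base)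
  let gm := (PySem.List.enumerate names).foldl pvStepG PySem.Dict.empty
  let csf := (PySem.List.enumerate names).foldl pvStepC PySem.Dict.empty
  bases.map (fun b => (b, gm.get? b, csf.get? b))

-- ===== PRECONDITION & SPEC =====
def Spec_get_gm_csf_index_map (names : List String) (out : List (String × Option Int × Option Int)) : Prop := out = get_gm_csf_index_map_alt names
instance (names : List String) (out : List (String × Option Int × Option Int)) : Decidable (Spec_get_gm_csf_index_map names out) := by unfold Spec_get_gm_csf_index_map; infer_instance

-- ===== CLAIM (what is proved, stated in full; the proofs are below) =====
def Claim_equal_get_gm_csf_index_map : Prop := ∀ (names : List String), Dom_get_gm_csf_index_map names → Spec_get_gm_csf_index_map names (get_gm_csf_index_map names)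

-- ===== LEMMAS AND PROOFS =====

-- getD after one iteration of A's loop body
theorem pvStepA_getD (d : PySem.Dict String (Option Int × Option Int)) (p : Int × String)
    (b : String) :
    (pvStepA d p).getD b (none, none) =
      if b = pvRsplit2Base p.2 then
        (if PySem.Str.isIn "_GM_Vol" p.2 then (some p.1, (d.getD b (none, none)).2)
         else if PySem.Str.isIn "_CSF_Vol" p.2 then ((d.getD b (none, none)).1, some p.1)
         else d.getD b (none, none))
      else d.getD b (none, none) := by
  simp only [pvStepA]
  by_cases hc : d.contains (pvRsplit2Base p.2) = true
  · rw [if_pos hc]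
    by_cases hb : b = pvRsplit2Base p.2
    · subst hb
      split_ifs with hg hcsf <;> simp_all [PySem.Dict.getD_modify_self]
    · rw [if_neg hb]
      split_ifs with hg hcsf <;> simp_all [PySem.Dict.getD_modify_of_ne _ _ _ hb]
  · have hcf : d.contains (pvRsplit2Base p.2) = false := by
      revert hc; cases d.contains (pvRsplit2Base p.2) <;> simp
    rw [if_neg hc]
    by_cases hb : b = pvRsplit2Base p.2
    · subst hb
      split_ifs with hg hcsf <;>
        simp_all [PySem.Dict.getD_modify_self,
          PySem.Dict.getD_of_not_contains d (((none : Option Int), (none : Option Int))) hcf]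
    · rw [if_neg hb]
      split_ifs with hg hcsf <;>
        simp_all [PySem.Dict.getD_modify_of_ne _ _ _ hb, PySem.Dict.getD_insert]

-- pointwise invariant of the three folds
theorem pvFold_getD (ps : List (Int × String)) :
    ∀ (d : PySem.Dict String (Option Int × Option Int)) (e c : PySem.Dict String Int)
      (b : String),
      d.getD b (none, none) = (e.get? b, c.get? b) →
      (ps.foldl pvStepA d).getD b (none, none) =
        ((ps.foldl pvStepG e).get? b, (ps.foldl pvStepC c).get? b) := by
  induction ps with
  | nil => intro d e c b h; simpa using h
  | cons p ps ih =>
    intro d e c b h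
    simp only [List.foldl_cons]
    apply ih
    rw [pvStepA_getD]
    simp only [pvStepG, pvStepC]
    by_cases hb : b = pvRsplit2Base p.2
    · subst hb
      generalize PySem.Str.isIn "_GM_Vol" p.2 = g at *
      generalize PySem.Str.isIn "_CSF_Vol" p.2 = f at *
      cases g <;> cases f <;> simp [h]
    · generalize PySem.Str.isIn "_GM_Vol" p.2 = g at *
      generalize PySem.Str.isIn "_CSF_Vol" p.2 = f at *
      cases g <;> cases f <;>
        simp [hb, h, PySem.Dict.get?_insert_of_ne e _ hb, PySem.Dict.get?_insert_of_ne c _ hb]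

-- keys after one iteration of A's loop body: first-appearance insertion
theorem pvStepA_keys (d : PySem.Dict String (Option Int × Option Int)) (p : Int × String) :
    (pvStepA d p).keys = PySem.Set.add d.keys (pvRsplit2Base p.2) := by
  simp only [pvStepA]
  by_cases hc : d.contains (pvRsplit2Base p.2) = true
  · have hm : pvRsplit2Base p.2 ∈ d.keys := (PySem.Dict.contains_iff_mem_keys _ _).1 hc
    rw [if_pos hc, PySem.Set.add_of_mem hm]
    split_ifs with hg hcsf
    · rw [PySem.Dict.keys_modify, PySem.Dict.keys_insert_of_contains _ _ hc]
    · rw [PySem.Dict.keys_modify, PySem.Dict.keys_insert_of_contains _ _ hc]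
    · rfl
  · have hm : pvRsplit2Base p.2 ∉ d.keys := fun hm =>
      hc ((PySem.Dict.contains_iff_mem_keys _ _).2 hm)
    rw [if_neg hc, PySem.Set.add_of_not_mem hm]
    split_ifs with hg hcsf
    · rw [PySem.Dict.keys_modify,
        PySem.Dict.keys_insert_of_contains _ _ (PySem.Dict.contains_insert_self _ _ _),
        PySem.Dict.keys_insert_of_not_contains _ _ (by revert hc; cases d.contains (pvRsplit2Base p.2) <;> simp)]
    · rw [PySem.Dict.keys_modify,
        PySem.Dict.keys_insert_of_contains _ _ (PySem.Dict.contains_insert_self _ _ _),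
        PySem.Dict.keys_insert_of_not_contains _ _ (by revert hc; cases d.contains (pvRsplit2Base p.2) <;> simp)]
    · rw [PySem.Dict.keys_insert_of_not_contains _ _ (by revert hc; cases d.contains (pvRsplit2Base p.2) <;> simp)]

-- keys of A's fold: first-appearance order of the bases
theorem pvFold_keys (ps : List (Int × String)) :
    ∀ (d : PySem.Dict String (Option Int × Option Int)),
      (ps.foldl pvStepA d).keys =
        PySem.Set.update d.keys (ps.map (fun p => pvRsplit2Base p.2)) := by
  induction ps with
  | nil => intro d; simp [PySem.Set.update]
  | cons p ps ih =>
    intro d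
    simp only [List.foldl_cons, List.map_cons, PySem.Set.update_cons]
    rw [ih, pvStepA_keys]

-- keys of A's fold from empty stay Nodup
theorem pvFold_nodup (ps : List (Int × String)) :
    ((ps.foldl pvStepA PySem.Dict.empty).keys).Nodup := by
  rw [pvFold_keys]
  simp only [PySem.Dict.keys_empty]
  rw [PySem.Set.update_nil_left]
  exact PySem.Set.nodup_ofList _

-- ===== VERDICT (by name: the statement is the Claim_ definition above) =====
theorem get_gm_csf_index_map_spec : Claim_equal_get_gm_csf_index_map := by
  intro names _
  unfold Spec_get_gm_csf_index_map
  simp only [get_gm_csf_index_map, get_gm_csf_index_map_alt]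
  rw [PySem.Dict.items_eq_map_keys _ (pvFold_nodup _) ((none, none) : Option Int × Option Int)]
  rw [pvFold_keys]
  simp only [PySem.Dict.keys_empty, PySem.Set.update_nil_left, List.map_map]
  have hmaps : (PySem.List.enumerate names 0).map (fun p => pvRsplit2Base p.2) =
      names.map pvRsplit2Base := by
    rw [show (fun (p : Int × String) => pvRsplit2Base p.2) =
        (pvRsplit2Base ∘ fun (p : Int × String) => p.2) from rfl,
      ← List.map_map, PySem.List.map_snd_enumerate]
  rw [hmaps, PySem.List.dedup_eq_ofList]
  apply List.map_congr_left
  intro b _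
  have h := pvFold_getD (PySem.List.enumerate names 0) PySem.Dict.empty
    PySem.Dict.empty PySem.Dict.empty b (by simp)
  simp [h]
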